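-- pv_equiv track=rewrite | github.com/visheshcse/LeetcodeQuestions | Python/Day09-Recursion/10.Coding_Blocks_Assignment-9.py | lexical_numbers
-- ===== SOURCE A (Python) =====
-- from typing import List
--
-- def lexical_numbers(n: int) -> List[int]:
--     """
--     Output integers 1..n in lexicographical (string comparison) order.
--     E.g. for n=13: [1,10,11,12,13,2,3,4,5,6,7,8,9].
--     TIME: O(n), SPACE: O(n)
--     """
--     res: List[int] = []
--
--     def dfs(curr: int) -> None:
--         if curr > n:
--             return
--         if curr != 0:
--             res.append(curr)
--         start = 0 if curr != 0 else 1
--         for d in range(start, 10):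
--             nxt = curr * 10 + d
--             if nxt == 0:
--                 continue
--             if nxt > n:
--                 break
--             dfs(nxt)
--
--     dfs(0)
--     return res
-- ===== SOURCE B (Python) =====
-- from typing import List
--
-- def lexical_numbers(n: int) -> List[int]:
--     """Iterative preorder over the implicit decimal trie: an explicit stack
--     replaces the recursive DFS; children are pushed in reverse so they pop
--     in increasing order."""
--     res: List[int] = []
--     stack = list(range(min(9, n), 0, -1))  # 1..min(9,n), 1 on top
--     while stack:
--         curr = stack.pop()
--         res.append(curr)
--         lo = curr * 10
--         hi = min(lo + 9, n)
--         for nxt in range(hi, lo - 1, -1):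
--             stack.append(nxt)
--     return res
-- ===== Notes on version B (the rewrite author's own statement) =====
-- stated objective: alternative
-- what changed: Replaces the recursive digit-by-digit DFS (nested closure mutating res, with break on overflow) by an iterative preorder traversal with an explicit stack, pushing each node's in-range children in reverse order.
import Mathlib
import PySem

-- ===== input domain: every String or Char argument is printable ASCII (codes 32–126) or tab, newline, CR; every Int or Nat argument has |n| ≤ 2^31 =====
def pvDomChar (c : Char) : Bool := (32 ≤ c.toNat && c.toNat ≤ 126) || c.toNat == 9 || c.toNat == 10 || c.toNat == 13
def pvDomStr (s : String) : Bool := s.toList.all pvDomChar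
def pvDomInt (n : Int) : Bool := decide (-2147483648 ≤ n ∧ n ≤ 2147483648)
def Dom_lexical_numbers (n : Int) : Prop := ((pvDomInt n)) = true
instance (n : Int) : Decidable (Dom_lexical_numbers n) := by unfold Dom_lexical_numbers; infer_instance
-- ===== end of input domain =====

-- B replaces A's recursive digit-trie DFS by an iterative preorder traversal with an
-- explicit stack (objective: alternative decomposition, same O(n) cost).

-- ===== PORT A =====
-- small named facts cited by the ports' termination proofs (kept tiny on purpose)
theorem pvLeToNat (n : Int) (x : Nat) (h : ¬((x : Int) > n)) : x ≤ n.toNat := by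
  rw [← Int.toNat_natCast x]
  exact Int.toNat_le_toNat (not_lt.mp h)

theorem pvSubLt (a c x : Nat) (hcx : c < x) (hxa : x ≤ a) : a + 1 - x < a + 1 - c :=
  Nat.sub_lt_sub_left (Nat.lt_of_lt_of_le hcx (Nat.le_succ_of_le hxa)) hcx

theorem pvDecCall (a c d : Nat) (h0 : c * 10 + d ≠ 0) (hle : c * 10 + d ≤ a) :
    a + 1 - (c * 10 + d) < a + 1 - c := by
  have hcx : c < c * 10 + d := by
    rcases Nat.eq_zero_or_pos c with hc | hc
    · subst hc; simpa using Nat.pos_of_ne_zero h0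
    · exact Nat.lt_of_lt_of_le ((Nat.lt_mul_iff_one_lt_right hc).mpr (by norm_num))
        (Nat.le_add_right _ _)
  exact pvSubLt a c _ hcx hle

theorem pvUb (a c x : Nat) (h1 : c * 10 ≤ x)
    (h2 : x < c * 10 + (min (c * 10 + 9) a + 1 - c * 10)) : x ≤ a := by
  rcases Nat.le_total (c * 10) (min (c * 10 + 9) a + 1) with h | h
  · rw [Nat.add_sub_cancel' h] at h2
    exact Nat.le_trans (Nat.le_of_lt_succ h2) (Nat.min_le_right _ _)
  · rw [Nat.sub_eq_zero_of_le h, Nat.add_zero] at h2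
    exact absurd h2 (Nat.not_lt.mpr h1)

theorem pvCastLe (n : Int) (x : Nat) (hn : 0 ≤ n) (hx : x ≤ n.toNat) : (x : Int) ≤ n :=
  le_trans (Int.ofNat_le.mpr hx) (le_of_eq (Int.toNat_of_nonneg hn))

theorem pvChildMem (n : Int) (c x : Nat) (hc1 : 0 < c) (hc2 : (c : Int) ≤ n) (h1 : c * 10 ≤ x)
    (h2 : x < c * 10 + (min (c * 10 + 9) n.toNat + 1 - c * 10)) : 0 < x ∧ (x : Int) ≤ n :=
  ⟨Nat.lt_of_lt_of_le (Nat.mul_pos hc1 (by norm_num)) h1,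
   pvCastLe n x (le_trans (Int.natCast_nonneg c) hc2) (pvUb n.toNat c x h1 h2)⟩

theorem pvPosToNat (n : Int) (h : 1 ≤ n.toNat) : 0 ≤ n := by omega

theorem pvInitMem (n : Int) (x : Nat) (h1 : 1 ≤ x) (h2 : x < 1 + min 9 n.toNat) :
    0 < x ∧ (x : Int) ≤ n := by
  rw [Nat.add_comm] at h2
  have hx : x ≤ min 9 n.toNat := Nat.le_of_lt_succ h2
  have hxa : x ≤ n.toNat := Nat.le_trans hx (Nat.min_le_right _ _)
  exact ⟨h1, pvCastLe n x (pvPosToNat n (Nat.le_trans h1 hxa)) hxa⟩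

-- Literal port of A's nested `dfs` (recursion) and its `for d in range(start, 10)` loop
-- (structural recursion over the remaining digit list, `break` returns the accumulator).
-- `curr` is always a nonnegative Python int, so it is carried as a Nat.
mutual
def dfsA (n : Int) (curr : Nat) (acc : List Int) : List Int :=
  if (curr : Int) > n then acc
  else
    let acc' := if curr ≠ 0 then acc ++ [(curr : Int)] else acc
    let start := if curr ≠ 0 then 0 else 1
    loopA n curr (List.range' start (10 - start)) acc'
termination_by (n.toNat + 1 - curr, 11)
decreasing_by
  exact Prod.Lex.right _ (by rw [List.length_range']; exact Nat.lt_succ_of_le (Nat.sub_le 10 start))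

def loopA (n : Int) (curr : Nat) (ds : List Nat) (acc : List Int) : List Int :=
  match ds with
  | [] => acc
  | d :: ds' =>
    let nxt := curr * 10 + d
    if h0 : nxt = 0 then loopA n curr ds' acc
    else if hgt : (nxt : Int) > n then acc
    else loopA n curr ds' (dfsA n nxt acc)
termination_by (n.toNat + 1 - curr, ds.length)
decreasing_by
  · exact Prod.Lex.right _ (Nat.lt_succ_self _)
  · exact Prod.Lex.left _ _ (pvDecCall n.toNat curr d h0 (pvLeToNat n _ hgt))
  · exact Prod.Lex.right _ (Nat.lt_succ_self _)
end

def lexical_numbers (n : Int) : List Int := dfsA n 0 []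

-- ===== PORT B =====
-- sizeB is a proof-side helper used only as runB's termination measure
-- (number of trie nodes in the subtree of c that are ≤ n).
def sizeB (n : Int) (c : Nat) : Nat :=
  if h : c = 0 ∨ (c : Int) > n then 0
  else 1 + (((List.range' (c * 10) (min (c * 10 + 9) n.toNat + 1 - c * 10))).attach.map
      (fun x => sizeB n x.1)).sum
termination_by n.toNat + 1 - c
decreasing_by
  have hm := List.mem_range'_1.mp x.2
  exact pvSubLt n.toNat c x.1
    (Nat.lt_of_lt_of_le ((Nat.lt_mul_iff_one_lt_right
        (Nat.pos_of_ne_zero (fun e => h (Or.inl e)))).mpr (by norm_num)) hm.1)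
    (pvUb n.toNat c x.1 hm.1 hm.2)

theorem pvRunDec (n : Int) (e : {c : Nat // 0 < c ∧ (c : Int) ≤ n})
    (rest children : List {c : Nat // 0 < c ∧ (c : Int) ≤ n})
    (hch : children.map Subtype.val
      = List.range' (e.1 * 10) (min (e.1 * 10 + 9) n.toNat + 1 - e.1 * 10)) :
    ((children ++ rest).map (fun x => sizeB n x.1)).sum
      < ((e :: rest).map (fun x => sizeB n x.1)).sum := by
  simp only [List.map_append, List.sum_append, List.map_cons, List.sum_cons]
  have hS : (children.map (fun x => sizeB n x.1)).sum
      = ((List.range' (e.1 * 10) (min (e.1 * 10 + 9) n.toNat + 1 - e.1 * 10)).map (sizeB n)).sum := by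
    rw [← hch, List.map_map]
    rfl
  rw [hS, sizeB, dif_neg (fun h => h.elim (fun hz => absurd hz (Nat.pos_iff_ne_zero.mp e.2.1))
    (fun g => absurd e.2.2 (not_le.mpr g)))]
  rw [List.attach_map_val]
  rw [Nat.add_comm 1]
  exact Nat.add_lt_add_right (Nat.lt_succ_self _) _

-- Port of B's while-loop over the explicit stack; the stack is represented
-- top-first (Python's list end = this list's head), so Python's reverse-order
-- pushes of range(hi, lo-1, -1) become the ascending block `List.range' lo (hi+1-lo)`
-- prepended to the rest of the stack.  Stack entries carry the invariant
-- 1 ≤ c ≤ n that B's stack values always satisfy (needed for termination).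
def runB (n : Int) (stack : List {c : Nat // 0 < c ∧ (c : Int) ≤ n}) (res : List Int) : List Int :=
  match stack with
  | [] => res
  | e :: rest =>
    let lo := e.1 * 10
    let hi := min (lo + 9) n.toNat
    let children := (List.range' lo (hi + 1 - lo)).attach.map
      (fun x => (⟨x.1, pvChildMem n e.1 x.1 e.2.1 e.2.2 (List.mem_range'_1.mp x.2).1
          (List.mem_range'_1.mp x.2).2⟩ : {c : Nat // 0 < c ∧ (c : Int) ≤ n}))
    runB n (children ++ rest) (res ++ [(e.1 : Int)])
termination_by (stack.map (fun e => sizeB n e.1)).sum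
decreasing_by
  exact pvRunDec n e rest _ (by rw [List.map_map]; exact List.attach_map_subtype_val _)

def lexical_numbers_alt (n : Int) : List Int :=
  let top := min 9 n.toNat
  let stack0 := (List.range' 1 top).attach.map
    (fun x => (⟨x.1, pvInitMem n x.1 (List.mem_range'_1.mp x.2).1
        (List.mem_range'_1.mp x.2).2⟩ : {c : Nat // 0 < c ∧ (c : Int) ≤ n}))
  runB n stack0 []

-- ===== PRECONDITION & SPEC =====
def Spec_lexical_numbers (n : Int) (out : List Int) : Prop := out = lexical_numbers_alt n
instance (n : Int) (out : List Int) : Decidable (Spec_lexical_numbers n out) := by unfold Spec_lexical_numbers; infer_instance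

-- ===== CLAIM (what is proved, stated in full; the proofs are below) =====
def Claim_equal_lexical_numbers : Prop := ∀ (n : Int), Dom_lexical_numbers n → Spec_lexical_numbers n (lexical_numbers n)

-- ===== LEMMAS AND PROOFS =====

theorem dfsA_append (n : Int) : ∀ (K c : Nat), n.toNat + 1 - c ≤ K →
    ∀ x y, dfsA n c (x ++ y) = x ++ dfsA n c y := by
  intro K
  induction K with
  | zero =>
    intro c hc x y
    rw [dfsA, dfsA]
    rw [if_pos (by omega), if_pos (by omega)]
  | succ K ih =>
    have loopApp : ∀ c, n.toNat + 1 - c ≤ K + 1 → ∀ ds, (∀ d ∈ ds, c * 10 + d ≠ 0) →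
        ∀ x y, loopA n c ds (x ++ y) = x ++ loopA n c ds y := by
      intro c hc ds
      induction ds with
      | nil => intro _ x y; rw [loopA, loopA]
      | cons d ds' ihds =>
        intro hds x y
        have hne : c * 10 + d ≠ 0 := hds d (by simp)
        rw [loopA, loopA]
        simp only [dif_neg hne]
        by_cases hgt : ((c * 10 + d : Nat) : Int) > n
        · rw [dif_pos hgt, dif_pos hgt]
        · rw [dif_neg hgt, dif_neg hgt]
          have hmeas : n.toNat + 1 - (c * 10 + d) ≤ K := by omega
          rw [ih (c * 10 + d) hmeas x y]
          exact ihds (fun d' hd' => hds d' (by simp [hd'])) x (dfsA n (c * 10 + d) y)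
    intro c hc x y
    rw [dfsA, dfsA]
    by_cases hgt : (c : Int) > n
    · rw [if_pos hgt, if_pos hgt]
    · rw [if_neg hgt, if_neg hgt]
      by_cases hc0 : c ≠ 0
      · simp only [if_pos hc0]
        have hxy : (x ++ y) ++ [(c : Int)] = x ++ (y ++ [(c : Int)]) := by simp
        rw [hxy]
        exact loopApp c hc _ (fun d _ => by omega) x (y ++ [(c : Int)])
      · simp only [if_neg hc0]
        apply loopApp c hc
        intro d hd
        simp only [List.mem_range'_1] at hd
        omega

theorem loopA_eq (n : Int) (c : Nat) : ∀ (ds : List Nat),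
    (∀ d ∈ ds, c * 10 + d ≠ 0) → ∀ (acc : List Int),
    loopA n c ds acc
      = ((ds.map (fun d => c * 10 + d)).takeWhile (fun (x : Nat) => decide ((x : Int) ≤ n))).foldl
          (fun a x => dfsA n x a) acc := by
  intro ds
  induction ds with
  | nil => intro _ acc; rw [loopA]; simp
  | cons d ds' ih =>
    intro hds acc
    have hne : c * 10 + d ≠ 0 := hds d (by simp)
    rw [loopA]
    simp only [dif_neg hne, List.map_cons, List.takeWhile_cons]
    by_cases hgt : ((c * 10 + d : Nat) : Int) > n
    · rw [dif_pos hgt]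
      rw [if_neg (by simp; omega)]
      simp
    · rw [dif_neg hgt]
      rw [if_pos (by simp; omega)]
      simp only [List.foldl_cons]
      exact ih (fun d' hd' => hds d' (by simp [hd'])) (dfsA n (c * 10 + d) acc)

theorem takeWhile_range'_le (N : Int) (a m : Nat) :
    (List.range' a m).takeWhile (fun (x : Nat) => decide ((x : Int) ≤ N))
      = List.range' a (min m ((N + 1 - a).toNat)) := by
  induction m generalizing a with
  | zero => simp
  | succ m ih =>
    rw [List.range'_succ, List.takeWhile_cons]
    by_cases h : (a : Int) ≤ N
    · rw [if_pos (by simpa using h), ih]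
      have h1 : min (m + 1) ((N + 1 - (a : Int)).toNat)
          = min m ((N + 1 - ((a : Nat) + 1 : Nat)).toNat) + 1 := by
        push_cast
        omega
      rw [h1, List.range'_succ]
    · rw [if_neg (by simpa using h)]
      have h1 : min (m + 1) ((N + 1 - (a : Int)).toNat) = 0 := by omega
      rw [h1]
      simp

theorem foldl_dfs (n : Int) : ∀ (l : List Nat) (acc : List Int),
    l.foldl (fun a x => dfsA n x a) acc = acc ++ l.flatMap (fun x => dfsA n x []) := by
  intro l
  induction l with
  | nil => simp
  | cons x l ih =>
    intro acc
    simp only [List.foldl_cons, List.flatMap_cons]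
    rw [ih]
    have hacc : dfsA n x acc = acc ++ dfsA n x [] := by
      have := dfsA_append n (n.toNat + 1 - x) x le_rfl acc []
      simpa using this
    rw [hacc, List.append_assoc]

theorem sub_eq (n : Int) (c : Nat) (h1 : 0 < c) (h2 : (c : Int) ≤ n) :
    dfsA n c [] = (c : Int) ::
      (List.range' (c * 10) (min (c * 10 + 9) n.toNat + 1 - c * 10)).flatMap
        (fun x => dfsA n x []) := by
  rw [dfsA]
  rw [if_neg (by omega)]
  have hc0 : c ≠ 0 := by omega
  simp only [if_pos hc0]
  rw [loopA_eq n c _ (fun d _ => by omega)]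
  rw [List.map_add_range']
  rw [takeWhile_range'_le n (c * 10 + 0) 10]
  have harith : min 10 ((n + 1 - ((c * 10 + 0 : Nat) : Int)).toNat)
      = min (c * 10 + 9) n.toNat + 1 - c * 10 := by
    push_cast
    omega
  rw [harith, foldl_dfs]
  simp

theorem runB_eq (n : Int) : ∀ (stack : List {c : Nat // 0 < c ∧ (c : Int) ≤ n}) (res : List Int),
    runB n stack res = res ++ (stack.map (fun e => dfsA n e.1 [])).flatten := by
  intro stack res
  induction stack, res using runB.induct n with
  | case1 res => rw [runB]; simp
  | case2 res e rest lo hi children ih =>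
    rw [runB]
    rw [ih]
    simp only [List.map_cons, List.flatten_cons, List.map_append, List.flatten_append]
    rw [sub_eq n e.1 e.2.1 e.2.2, ← List.flatMap_def]
    simp
    have hch : children.unattach = List.range' lo (hi + 1 - lo) := by
      rw [List.unattach, List.map_map]
      exact List.attach_map_subtype_val _
    rw [hch]

-- ===== VERDICT (by name: the statement is the Claim_ definition above) =====
theorem top_eq (n : Int) :
    dfsA n 0 [] = (List.range' 1 (min 9 n.toNat)).flatMap (fun x => dfsA n x []) := by
  rw [dfsA]
  simp only [Nat.cast_zero]
  by_cases hn : (0 : Int) > n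
  · rw [if_pos hn]
    have h0 : min 9 n.toNat = 0 := by omega
    rw [h0]
    simp
  · rw [if_neg hn]
    show loopA n 0 (List.range' 1 (10 - 1)) [] = _
    rw [loopA_eq n 0 _ (by intro d hd; simp only [List.mem_range'_1] at hd; omega)]
    have hmap : (List.range' 1 (10 - 1)).map (fun d => 0 * 10 + d) = List.range' 1 9 := by
      simp
    rw [hmap, takeWhile_range'_le n 1 9]
    have h1 : min 9 ((n + 1 - ((1 : Nat) : Int)).toNat) = min 9 n.toNat := by
      push_cast
      omega
    rw [h1, foldl_dfs]
    simp

theorem lexical_numbers_spec : Claim_equal_lexical_numbers := by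
  intro n _
  show lexical_numbers n = lexical_numbers_alt n
  unfold lexical_numbers lexical_numbers_alt
  rw [runB_eq]
  simp only [List.map_map, Function.comp_def, List.nil_append]
  rw [top_eq, List.flatMap_def]
  congr 1
  exact (List.attach_map_val).symm
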